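-- pv_equiv track=rewrite | github.com/solidtony/advent_of_code | advent_of_code/year_2024/day_9/defs.py | iter_free_space
-- ===== SOURCE A (Python) =====
-- from typing import List
-- from typing import Tuple
--
-- FREE_SPACE_SYMBOL = '.'
--
-- def iter_free_space(disk_map:List[str]) -> Tuple[int,int]:
--     index = 0
--     last_index = len(disk_map) - 1
--     while(index < last_index):
--         block_size = 0
--         if disk_map[index] == FREE_SPACE_SYMBOL:
--             while(
--                 index + block_size < last_index
--                 and disk_map[index + block_size] == FREE_SPACE_SYMBOL
--             ):
--                 block_size += 1
--             yield index, block_size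
--         index += block_size + 1
--     return None
-- ===== SOURCE B (Python) =====
-- FREE_SPACE_SYMBOL = '.'
--
-- def iter_free_space(disk_map):
--     # Stage 1: positions of free cells (last element never examined).
--     positions = [i for i, x in enumerate(disk_map[:-1]) if x == FREE_SPACE_SYMBOL]
--     # Stage 2: merge consecutive integers into (start, length) runs.
--     start = prev = None
--     for p in positions:
--         if prev == p - 1:
--             prev = p
--         else:
--             if start is not None:
--                 yield start, prev - start + 1
--             start = prev = p
--     if start is not None:
--         yield start, prev - start + 1
-- ===== Notes on version B (the rewrite author's own statement) =====
-- stated objective: alternative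
-- what changed: Instead of A's index-jumping scan with a nested run-measuring while-loop over the symbols, B first materializes the list of indices holding '.' (a filtered enumerate over disk_map[:-1]) and then forms runs purely arithmetically by merging consecutive integers in that index list.
import Mathlib
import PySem

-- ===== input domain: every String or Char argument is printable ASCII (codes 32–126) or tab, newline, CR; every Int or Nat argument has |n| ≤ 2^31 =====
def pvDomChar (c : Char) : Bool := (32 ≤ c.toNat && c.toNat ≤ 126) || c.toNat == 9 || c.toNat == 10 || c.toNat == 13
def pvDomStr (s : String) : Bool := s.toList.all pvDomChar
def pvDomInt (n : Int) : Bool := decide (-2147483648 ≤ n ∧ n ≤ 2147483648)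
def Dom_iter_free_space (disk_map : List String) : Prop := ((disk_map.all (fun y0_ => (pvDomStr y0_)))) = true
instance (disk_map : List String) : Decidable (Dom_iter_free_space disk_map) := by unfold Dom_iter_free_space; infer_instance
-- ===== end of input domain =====

-- B replaces A's index-jumping symbol scan (nested run-measuring while) with two stages:
-- collect the indices of '.' cells, then merge consecutive integers into runs (objective: alternative).

-- ===== PORT A =====
-- inner 'while' of A: grows block_size while the scanned element equals '.'
-- (disk_map[index + block_size] is always in range here, so the .getD "" default is never used)
def iterFreeInner (dm : List String) (li idx bs : Int) : Int :=
  if h : idx + bs < li ∧ (PySem.List.pyGet? dm (idx + bs)).getD "" = "." then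
    iterFreeInner dm li idx (bs + 1)
  else bs
termination_by (li - (idx + bs)).toNat
decreasing_by obtain ⟨h1, _⟩ := h; omega

-- the inner while never decreases block_size (needed for the outer loop's termination)
theorem iterFreeInner_ge (dm : List String) (li idx bs : Int) :
    bs ≤ iterFreeInner dm li idx bs := by
  fun_induction iterFreeInner dm li idx bs
  all_goals omega

-- outer 'while' of A
def iterFreeLoop (dm : List String) (li idx : Int) : List (Int × Int) :=
  if h : idx < li then
    if (PySem.List.pyGet? dm idx).getD "" = "." then
      let bs := iterFreeInner dm li idx 0
      (idx, bs) :: iterFreeLoop dm li (idx + bs + 1)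
    else
      iterFreeLoop dm li (idx + 0 + 1)
  else []
termination_by (li - idx).toNat
decreasing_by
  · have := iterFreeInner_ge dm li idx 0; omega
  · omega

def iter_free_space (disk_map : List String) : List (Int × Int) :=
  iterFreeLoop disk_map ((disk_map.length : Int) - 1) 0

-- ===== PORT B =====
-- stage 1 of B: '[i for i, x in enumerate(..)]' with running index j, keeping i where x == '.'
def posFrom (j : Int) : List String → List Int
  | [] => []
  | x :: xs => if x = "." then j :: posFrom (j + 1) xs else posFrom (j + 1) xs

-- B's 'if start is not None: yield start, prev - start + 1'
def yieldGroup : Option Int → Option Int → List (Int × Int)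
  | some s, some pv => [(s, pv - s + 1)]
  | _, _ => []

-- stage 2 of B: the for-loop merging consecutive integers
-- (Python's 'prev == p - 1' is exactly 'prev = some (p - 1)' here)
def groupLoop (start prev : Option Int) : List Int → List (Int × Int)
  | [] => yieldGroup start prev
  | p :: rest =>
      if prev = some (p - 1) then groupLoop start (some p) rest
      else yieldGroup start prev ++ groupLoop (some p) (some p) rest

def iter_free_space_alt (disk_map : List String) : List (Int × Int) :=
  groupLoop none none (posFrom 0 (PySem.List.slice disk_map none (some (-1))))

-- ===== PRECONDITION & SPEC =====
def Spec_iter_free_space (disk_map : List String) (out : List (Int × Int)) : Prop := out = iter_free_space_alt disk_map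
instance (disk_map : List String) (out : List (Int × Int)) : Decidable (Spec_iter_free_space disk_map out) := by unfold Spec_iter_free_space; infer_instance

-- ===== CLAIM (what is proved, stated in full; the proofs are below) =====
def Claim_equal_iter_free_space : Prop := ∀ (disk_map : List String), Dom_iter_free_space disk_map → Spec_iter_free_space disk_map (iter_free_space disk_map)

-- ===== LEMMAS AND PROOFS =====

-- proof-side intermediate representation: the (value, run length) decomposition of the list;
-- A's loop is first shown to produce emitRuns/pyRuns, which is then bridged to B's two stages.
def runPrefLen (x : String) : List String → Nat
  | [] => 0
  | y :: ys => if y = x then runPrefLen x ys + 1 else 0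

def pyRuns : List String → List (String × Nat)
  | [] => []
  | x :: xs => (x, runPrefLen x xs + 1) :: pyRuns (xs.drop (runPrefLen x xs))
termination_by l => l.length
decreasing_by simp

def emitRuns : Int → List (String × Nat) → List (Int × Int)
  | _, [] => []
  | off, (v, len) :: rest =>
    if v = "." then (off, (len : Int)) :: emitRuns (off + len) rest
    else emitRuns (off + len) rest

theorem runPrefLen_le (x : String) (l : List String) : runPrefLen x l ≤ l.length := by
  induction l with
  | nil => simp [runPrefLen]
  | cons y ys ih => simp only [runPrefLen, List.length_cons]; split <;> omega

theorem lt_li_iff (dm : List String) (p : Nat) :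
    ((p : Int) < (dm.length : Int) - 1) ↔ p < dm.dropLast.length := by
  simp only [List.length_dropLast]; omega

theorem elem_bridge (dm : List String) (p : Nat) (hp : p < dm.dropLast.length) :
    (PySem.List.pyGet? dm (p : Int)).getD "" = dm.dropLast[p] := by
  have hlen : p < dm.length := by simp only [List.length_dropLast] at hp; omega
  rw [PySem.List.pyGet?_natCast, List.getElem?_eq_getElem hlen]
  simp [List.getElem_dropLast]

-- the element just after the leading x-run (if any) is not x
theorem runPrefLen_max (x : String) (l : List String) :
    ∀ {y : String} {ys : List String}, l.drop (runPrefLen x l) = y :: ys → y ≠ x := by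
  induction l with
  | nil => intro y ys h; simp [runPrefLen] at h
  | cons z zs ih =>
    intro y ys h
    by_cases hz : z = x
    · simp only [runPrefLen, hz] at h
      exact ih h
    · simp only [runPrefLen, if_neg hz, List.drop_zero] at h
      cases h; exact hz

-- emitting the runs of l equals emitting them after skipping a (non-'.') x-prefix
theorem emit_skip (x : String) (hx : x ≠ ".") (l : List String) (off : Int) :
    emitRuns off (pyRuns l)
      = emitRuns (off + (runPrefLen x l : Nat)) (pyRuns (l.drop (runPrefLen x l))) := by
  cases l with
  | nil => simp [runPrefLen]
  | cons y ys =>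
    by_cases hy : y = x
    · subst hy
      simp only [runPrefLen, pyRuns]
      rw [emitRuns, if_neg hx]
      simp [List.drop_succ_cons]
    · simp only [runPrefLen, if_neg hy, List.drop_zero, Nat.cast_zero, add_zero]

theorem inner_eq (dm : List String) (j : Nat) :
    ∀ (n b : Nat), dm.dropLast.length - (j + b) = n →
      iterFreeInner dm ((dm.length : Int) - 1) (j : Int) (b : Int)
        = (b : Int) + (runPrefLen "." (dm.dropLast.drop (j + b)) : Nat) := by
  intro n
  induction n with
  | zero =>
    intro b hb
    have hge : dm.dropLast.length ≤ j + b := by omega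
    rw [iterFreeInner]
    have hlt : ¬ ((j : Int) + (b : Int) < (dm.length : Int) - 1) := by
      have := lt_li_iff dm (j + b); push_cast at this; omega
    rw [dif_neg (by intro hc; exact hlt hc.1)]
    rw [List.drop_eq_nil_of_le hge]
    simp [runPrefLen]
  | succ n ih =>
    intro b hb
    have hlt : j + b < dm.dropLast.length := by omega
    have hcons : dm.dropLast.drop (j + b) = dm.dropLast[j + b] :: dm.dropLast.drop (j + b + 1) :=
      List.drop_eq_getElem_cons hlt
    have hlti : ((j : Int) + (b : Int) < (dm.length : Int) - 1) := by
      have := lt_li_iff dm (j + b); push_cast at this; omega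
    have helem : (PySem.List.pyGet? dm ((j : Int) + (b : Int))).getD "" = dm.dropLast[j + b] := by
      have := elem_bridge dm (j + b) hlt; push_cast at this ⊢; exact this
    rw [iterFreeInner]
    by_cases hdot : dm.dropLast[j + b] = "."
    · rw [dif_pos ⟨hlti, by rw [helem, hdot]⟩]
      have hrec := ih (b + 1) (by omega)
      push_cast at hrec
      rw [show (b : Int) + 1 = ((b : Nat) : Int) + 1 from rfl] at hrec
      rw [hrec, hcons]
      simp only [runPrefLen, if_pos hdot]
      have : j + (b + 1) = j + b + 1 := by omega
      rw [this] at *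
      push_cast; ring
    · rw [dif_neg (by intro hc; exact hdot (helem ▸ hc.2))]
      rw [hcons]
      simp only [runPrefLen, if_neg hdot, Nat.cast_zero, add_zero]

theorem main_loop (dm : List String) :
    ∀ (n j : Nat), dm.dropLast.length - j = n →
      iterFreeLoop dm ((dm.length : Int) - 1) (j : Int)
        = emitRuns (j : Int) (pyRuns (dm.dropLast.drop j)) := by
  intro n
  induction n using Nat.strong_induction_on with
  | _ n ih =>
  intro j hj
  by_cases hlt : j < dm.dropLast.length
  case neg =>
    rw [List.drop_eq_nil_of_le (by omega), iterFreeLoop]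
    rw [dif_neg (by have := lt_li_iff dm j; omega)]
    simp [pyRuns, emitRuns]
  case pos =>
  have hcons : dm.dropLast.drop j = dm.dropLast[j] :: dm.dropLast.drop (j + 1) :=
    List.drop_eq_getElem_cons hlt
  have hlti : ((j : Int) < (dm.length : Int) - 1) := (lt_li_iff dm j).mpr hlt
  have helem := elem_bridge dm j hlt
  rw [iterFreeLoop, dif_pos hlti]
  by_cases hdot : dm.dropLast[j] = "."
  · rw [if_pos (by rw [helem, hdot])]
    show ((j : Int), iterFreeInner dm ((dm.length : Int) - 1) (j : Int) 0)
        :: iterFreeLoop dm ((dm.length : Int) - 1)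
            ((j : Int) + iterFreeInner dm ((dm.length : Int) - 1) (j : Int) 0 + 1)
      = emitRuns (j : Int) (pyRuns (dm.dropLast.drop j))
    have hinner := inner_eq dm j (dm.dropLast.length - j) 0 (by omega)
    simp only [Nat.add_zero, Nat.cast_zero, zero_add] at hinner
    set kk : Nat := runPrefLen "." (dm.dropLast.drop j) with hkk
    have hkpos : 1 ≤ kk := by rw [hkk, hcons, runPrefLen, if_pos hdot]; omega
    have hkle : kk ≤ dm.dropLast.length - j := by
      have := runPrefLen_le "." (dm.dropLast.drop j)
      simp only [List.length_drop] at this; omega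
    have hrec := ih (dm.dropLast.length - (j + kk + 1)) (by omega) (j + kk + 1) rfl
    rw [hinner]
    have hcast : (j : Int) + (kk : Int) + 1 = ((j + kk + 1 : Nat) : Int) := by push_cast; ring
    rw [hcast, hrec]
    have hk' : runPrefLen "." (dm.dropLast.drop (j + 1)) = kk - 1 := by
      rw [hkk, hcons, runPrefLen, if_pos hdot]; omega
    rw [hcons, pyRuns, hdot, hk']
    rw [emitRuns, if_pos rfl]
    have h1 : kk - 1 + 1 = kk := by omega
    rw [h1]
    refine congrArg (List.cons _) ?_
    have hdrop : (dm.dropLast.drop (j + 1)).drop (kk - 1) = dm.dropLast.drop (j + kk) := by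
      rw [List.drop_drop]; congr 1; omega
    rw [hdrop]
    cases hnext : dm.dropLast.drop (j + kk) with
    | nil =>
      have : dm.dropLast.drop (j + kk + 1) = [] :=
        List.drop_eq_nil_of_le (by
          have := congrArg List.length hnext
          simp only [List.length_drop, List.length_nil] at this; omega)
      rw [this]; simp [pyRuns, emitRuns]
    | cons y ys =>
      have hy : y ≠ "." := by
        apply runPrefLen_max "." (dm.dropLast.drop j)
        rw [← hkk, List.drop_drop]
        exact hnext
      have hys : dm.dropLast.drop (j + kk + 1) = ys := by
        have := congrArg (List.drop 1) hnext
        rw [List.drop_drop] at this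
        simpa [show 1 + (j + kk) = j + kk + 1 from by omega] using this
      rw [hys, pyRuns]
      simp only [emitRuns]
      rw [if_neg hy]
      rw [emit_skip y hy ys (((j + kk + 1 : Nat)) : Int)]
      push_cast; ring_nf
  · rw [if_neg (by rw [helem]; exact hdot)]
    have hrec := ih (dm.dropLast.length - (j + 1)) (by omega) (j + 1) rfl
    have hcast : (j : Int) + 0 + 1 = ((j + 1 : Nat) : Int) := by push_cast; ring
    rw [hcast, hrec, hcons, pyRuns]
    simp only [emitRuns]
    rw [if_neg hdot]
    rw [emit_skip dm.dropLast[j] hdot (dm.dropLast.drop (j + 1)) (((j + 1 : Nat)) : Int)]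
    push_cast; ring_nf

-- ===== bridge: emitRuns/pyRuns = B's two-stage computation =====

-- every emitted position is at least the running index
theorem posFrom_ge (ys : List String) : ∀ (m q : Int) (rest : List Int),
    posFrom m ys = q :: rest → m ≤ q := by
  induction ys with
  | nil => intro m q rest h; simp [posFrom] at h
  | cons y ys ih =>
    intro m q rest h
    by_cases hy : y = "."
    · rw [posFrom, if_pos hy] at h
      cases h; omega
    · rw [posFrom, if_neg hy] at h
      have := ih (m + 1) q rest h; omega

-- skipping a leading x-run (x ≠ '.') contributes no positions
theorem posFrom_skip (x : String) (hx : x ≠ ".") : ∀ (l : List String) (j : Int),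
    posFrom j l = posFrom (j + (runPrefLen x l : Nat)) (l.drop (runPrefLen x l)) := by
  intro l
  induction l with
  | nil => intro j; simp [runPrefLen]
  | cons y ys ih =>
    intro j
    by_cases hy : y = x
    · subst hy
      rw [posFrom, if_neg hx]
      simp only [runPrefLen]
      rw [ih (j + 1)]
      congr 1
      push_cast; ring
    · simp only [runPrefLen, if_neg hy, List.drop_zero, Nat.cast_zero, add_zero]

-- restarting: a non-consecutive head closes the open group and begins afresh
theorem group_restart (start prev : Option Int) (q : Int) (rest : List Int)
    (hq : prev ≠ some (q - 1)) :
    groupLoop start prev (q :: rest) = yieldGroup start prev ++ groupLoop none none (q :: rest) := by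
  rw [groupLoop, if_neg hq, groupLoop, if_neg (by simp)]
  simp [yieldGroup]

-- an open group absorbs exactly the leading '.'-run of the remaining cells
theorem group_absorb (xs : List String) : ∀ (s pv : Int),
    groupLoop (some s) (some pv) (posFrom (pv + 1) xs)
      = (s, pv + (runPrefLen "." xs : Nat) - s + 1)
        :: groupLoop none none
            (posFrom (pv + 1 + (runPrefLen "." xs : Nat)) (xs.drop (runPrefLen "." xs))) := by
  induction xs with
  | nil => intro s pv; simp [posFrom, groupLoop, yieldGroup, runPrefLen]
  | cons y ys ih =>
    intro s pv
    by_cases hy : y = "."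
    · rw [posFrom, if_pos hy, groupLoop, if_pos (by congr 1; ring)]
      rw [ih s (pv + 1)]
      rw [show runPrefLen "." (y :: ys) = runPrefLen "." ys + 1 from by
            simp [runPrefLen, hy]]
      rw [show List.drop (runPrefLen "." ys + 1) (y :: ys) = List.drop (runPrefLen "." ys) ys from
            List.drop_succ_cons]
      rw [show pv + ((runPrefLen "." ys + 1 : Nat) : Int) - s + 1
              = pv + 1 + ((runPrefLen "." ys : Nat) : Int) - s + 1 from by push_cast; ring]
      rw [show pv + 1 + ((runPrefLen "." ys + 1 : Nat) : Int)
              = pv + 1 + 1 + ((runPrefLen "." ys : Nat) : Int) from by push_cast; ring]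
    · simp only [runPrefLen, if_neg hy, Nat.cast_zero, add_zero, List.drop_zero]
      rw [posFrom, if_neg hy]
      cases hL : posFrom (pv + 1 + 1) ys with
      | nil => simp [groupLoop, yieldGroup]
      | cons q rest =>
        have hge : pv + 2 ≤ q := by
          have := posFrom_ge ys (pv + 1 + 1) q rest hL; omega
        rw [group_restart (some s) (some pv) q rest (by intro hc; injection hc with hc; omega)]
        rfl

theorem bridge_aux : ∀ (n : Nat) (l : List String), l.length ≤ n → ∀ (j : Int),
    emitRuns j (pyRuns l) = groupLoop none none (posFrom j l) := by
  intro n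
  induction n with
  | zero =>
    intro l hl j
    have : l = [] := List.eq_nil_of_length_eq_zero (by omega)
    subst this
    simp [pyRuns, emitRuns, posFrom, groupLoop, yieldGroup]
  | succ n ih =>
    intro l hl j
    cases l with
    | nil => simp [pyRuns, emitRuns, posFrom, groupLoop, yieldGroup]
    | cons x xs =>
      have hxs : xs.length ≤ n := by simp at hl; omega
      rw [pyRuns]
      set k : Nat := runPrefLen x xs with hk
      have hdlen : (xs.drop k).length ≤ n := by simp; omega
      by_cases hx : x = "."
      · rw [emitRuns, if_pos hx]
        rw [posFrom, if_pos hx, groupLoop, if_neg (by simp), yieldGroup]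
        rw [show ([] : List (Int × Int)) ++ groupLoop (some j) (some j) (posFrom (j + 1) xs)
              = groupLoop (some j) (some j) (posFrom (j + 1) xs) from by simp]
        rw [hx] at hk
        rw [group_absorb xs j j, ← hk]
        rw [← ih (xs.drop k) hdlen (j + 1 + (k : Int))]
        rw [show j + (((k + 1 : Nat)) : Int) = j + 1 + (k : Int) from by push_cast; ring]
        rw [show j + (k : Int) - j + 1 = (((k + 1 : Nat)) : Int) from by push_cast; ring]
        intro s pv h _
        cases h
      · rw [emitRuns, if_neg hx]
        rw [posFrom, if_neg hx, posFrom_skip x hx xs (j + 1), ← hk]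
        rw [← ih (xs.drop k) hdlen (j + 1 + (k : Int))]
        rw [show j + (((k + 1 : Nat)) : Int) = j + 1 + (k : Int) from by push_cast; ring]

theorem bridge (l : List String) (j : Int) :
    emitRuns j (pyRuns l) = groupLoop none none (posFrom j l) :=
  bridge_aux l.length l le_rfl j

-- ===== VERDICT (by name: the statement is the Claim_ definition above) =====
theorem iter_free_space_spec : Claim_equal_iter_free_space := by
  intro dm _
  unfold Spec_iter_free_space iter_free_space iter_free_space_alt
  rw [PySem.List.slice_to_neg_one]
  have h1 := main_loop dm dm.dropLast.length 0 rfl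
  have h2 := bridge dm.dropLast 0
  simp only [List.drop_zero] at h1
  simpa [h2] using h1
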